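-- pv_equiv track=rewrite | github.com/jon-devlapaz/socratink-app | ai_service.py | _with_telemetry_context
-- ===== SOURCE A (Python) =====
-- def _with_telemetry_context(event: dict, telemetry_context: dict | None) -> dict:
--     if not telemetry_context:
--         return event
--     merged = dict(event)
--     for key, value in telemetry_context.items():
--         if key not in merged:
--             merged[key] = value
--     return merged
-- ===== SOURCE B (Python) =====
-- def _with_telemetry_context(event: dict, telemetry_context: dict | None) -> dict:
--     if not telemetry_context:
--         return event
--     extra = dict(telemetry_context)
--     for key in event:
--         extra.pop(key, None)
--     return {**event, **extra}
-- ===== Notes on version B (the rewrite author's own statement) =====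
-- stated objective: alternative
-- what changed: Instead of copying event and looping over telemetry items with a per-item membership test, B inverts the roles: it copies the telemetry dict, loops over event keys deleting them from that copy, and then merges event with the surviving telemetry-only remainder by dict unpacking.
import Mathlib
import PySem

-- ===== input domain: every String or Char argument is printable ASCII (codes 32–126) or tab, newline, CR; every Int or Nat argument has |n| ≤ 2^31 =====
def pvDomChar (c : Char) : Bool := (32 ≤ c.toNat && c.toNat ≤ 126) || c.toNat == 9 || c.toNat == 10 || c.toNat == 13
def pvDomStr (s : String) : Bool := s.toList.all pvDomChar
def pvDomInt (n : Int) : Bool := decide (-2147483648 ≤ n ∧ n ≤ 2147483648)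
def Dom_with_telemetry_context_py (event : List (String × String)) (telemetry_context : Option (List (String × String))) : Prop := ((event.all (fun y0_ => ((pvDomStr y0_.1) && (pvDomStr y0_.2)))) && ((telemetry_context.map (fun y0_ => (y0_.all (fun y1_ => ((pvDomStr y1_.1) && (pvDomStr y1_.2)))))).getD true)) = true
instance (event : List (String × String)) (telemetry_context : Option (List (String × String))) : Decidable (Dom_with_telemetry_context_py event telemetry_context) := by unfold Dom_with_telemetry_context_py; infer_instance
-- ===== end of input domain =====

-- B inverts A's loop: instead of copying event and adding each telemetry item
-- whose key is absent, it deletes every event key from a copy of the telemetry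
-- dict and merges event with the remainder (alternative; same asymptotic cost).


-- ===== PORT A =====
-- dicts are assoc lists with distinct keys (insertion order); 'key in merged'
-- is a key-membership test, 'merged[key] = value' for an absent key appends.
def with_telemetry_context_py (event : List (String × String)) (telemetry_context : Option (List (String × String))) : List (String × String) :=
  match telemetry_context with
  | none => event
  | some t =>
    if t.isEmpty then event
    else
      -- merged = dict(event); for key, value in t.items(): if key not in merged: merged[key] = value
      t.foldl (fun merged p => if merged.any (fun q => q.1 == p.1) then merged else merged ++ [p]) event

-- ===== PORT B =====
-- Python dict assignment d[k] = v: overwrite in place if k present, else append.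
def pyDictInsert (d : List (String × String)) (k v : String) : List (String × String) :=
  if d.any (fun q => q.1 == k) then d.map (fun q => if q.1 == k then (k, v) else q)
  else d ++ [(k, v)]

-- extra = dict(t); for key in event: extra.pop(key, None); return {**event, **extra}
def with_telemetry_context_py_alt (event : List (String × String)) (telemetry_context : Option (List (String × String))) : List (String × String) :=
  match telemetry_context with
  | none => event
  | some t =>
    if t.isEmpty then event
    else
      let extra := event.foldl (fun ex p => ex.eraseP (fun q => q.1 == p.1)) t
      extra.foldl (fun d p => pyDictInsert d p.1 p.2) event

-- ===== PRECONDITION & SPEC =====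
-- Pre_ excludes assoc lists with duplicate keys: both parameters are Python
-- dicts, whose key lists are always duplicate-free, so A never receives them.
def Pre_with_telemetry_context_py (event : List (String × String)) (telemetry_context : Option (List (String × String))) : Prop :=
  (event.map Prod.fst).Nodup ∧ ((telemetry_context.getD []).map Prod.fst).Nodup
instance (event : List (String × String)) (telemetry_context : Option (List (String × String))) : Decidable (Pre_with_telemetry_context_py event telemetry_context) := by unfold Pre_with_telemetry_context_py; infer_instance

def pvWitness_with_telemetry_context_py : (List (String × String)) × (Option (List (String × String))) :=
  ([("a", "1")], some [("a", "9"), ("b", "2")])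

def Spec_with_telemetry_context_py (event : List (String × String)) (telemetry_context : Option (List (String × String))) (out : List (String × String)) : Prop := out = with_telemetry_context_py_alt event telemetry_context
instance (event : List (String × String)) (telemetry_context : Option (List (String × String))) (out : List (String × String)) : Decidable (Spec_with_telemetry_context_py event telemetry_context out) := by unfold Spec_with_telemetry_context_py; infer_instance

-- ===== CLAIM (what is proved, stated in full; the proofs are below) =====
def Claim_equal_with_telemetry_context_py : Prop := ∀ (event : List (String × String)) (telemetry_context : Option (List (String × String))), Dom_with_telemetry_context_py event telemetry_context → Pre_with_telemetry_context_py event telemetry_context → Spec_with_telemetry_context_py event telemetry_context (with_telemetry_context_py event telemetry_context)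

-- ===== LEMMAS AND PROOFS =====

-- A's accumulating loop, started from any acc, appends exactly the telemetry
-- items whose keys are absent from acc, provided the telemetry keys are distinct.
theorem foldA_eq_append_filter (t : List (String × String)) (acc : List (String × String))
    (h : (t.map Prod.fst).Nodup) :
    t.foldl (fun merged p => if merged.any (fun q => q.1 == p.1) then merged else merged ++ [p]) acc
      = acc ++ t.filter (fun p => !(acc.any (fun q => q.1 == p.1))) := by
  induction t generalizing acc with
  | nil => simp
  | cons a rest ih =>
    simp only [List.map_cons, List.nodup_cons] at h
    by_cases hc : acc.any (fun q => q.1 == a.1) = true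
    · rw [List.foldl_cons, if_pos hc, ih acc h.2, List.filter_cons]
      simp [hc]
    · simp only [List.foldl_cons, if_neg hc, List.filter_cons]
      rw [ih _ h.2]
      have hfilt : rest.filter (fun p => !((acc ++ [a]).any (fun q => q.1 == p.1)))
          = rest.filter (fun p => !(acc.any (fun q => q.1 == p.1))) := by
        apply List.filter_congr
        intro x hx
        have hne : a.1 ≠ x.1 := by
          intro he
          exact h.1 (he ▸ List.mem_map_of_mem hx)
        simp only [List.any_append, Bool.not_or]
        simp [beq_iff_eq]
        exact fun _ => hne
      rw [hfilt]
      simp [hc]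

-- pop on a dict with distinct keys = filter the key out.
theorem eraseP_eq_filter_of_nodup (t : List (String × String)) (k : String)
    (h : (t.map Prod.fst).Nodup) :
    t.eraseP (fun q => q.1 == k) = t.filter (fun q => !(q.1 == k)) := by
  induction t with
  | nil => rfl
  | cons a rest ih =>
    simp only [List.map_cons, List.nodup_cons] at h
    by_cases hc : a.1 = k
    · rw [List.eraseP_cons_of_pos (by simp [hc]), List.filter_cons, if_neg (by simp [hc])]
      symm
      apply List.filter_eq_self.2
      intro x hx
      have hne : x.1 ≠ k := by
        intro he
        exact h.1 ((hc.trans he.symm) ▸ List.mem_map_of_mem hx)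
      simp [hne]
    · rw [List.eraseP_cons_of_neg (by simp [hc]), List.filter_cons, if_pos (by simp [hc]),
          ih h.2]

-- filtering keeps the keys duplicate-free
theorem nodup_keys_filter (t : List (String × String)) (p : String × String → Bool)
    (h : (t.map Prod.fst).Nodup) : ((t.filter p).map Prod.fst).Nodup :=
  h.sublist (List.Sublist.map _ List.filter_sublist)

-- B's erasing loop over event keys = one filter keeping telemetry-only items.
theorem foldErase_eq_filter (event t : List (String × String))
    (h : (t.map Prod.fst).Nodup) :
    event.foldl (fun ex p => ex.eraseP (fun q => q.1 == p.1)) t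
      = t.filter (fun p => !(event.any (fun q => q.1 == p.1))) := by
  induction event generalizing t with
  | nil => simp
  | cons e es ih =>
    rw [List.foldl_cons, eraseP_eq_filter_of_nodup t e.1 h,
        ih _ (nodup_keys_filter t _ h), List.filter_filter]
    apply List.filter_congr
    intro x _
    simp only [List.any_cons, Bool.not_or]
    rw [Bool.and_comm, show (e.1 == x.1) = (x.1 == e.1) by simp [eq_comm]]

-- inserting items whose keys are all fresh and pairwise distinct appends them.
theorem foldInsert_fresh (xs d : List (String × String))
    (hfresh : ∀ p ∈ xs, ¬ d.any (fun q => q.1 == p.1) = true)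
    (hnd : (xs.map Prod.fst).Nodup) :
    xs.foldl (fun d p => pyDictInsert d p.1 p.2) d = d ++ xs := by
  induction xs generalizing d with
  | nil => simp
  | cons a rest ih =>
    simp only [List.map_cons, List.nodup_cons] at hnd
    have ha : ¬ d.any (fun q => q.1 == a.1) = true := hfresh a (List.mem_cons_self ..)
    rw [List.foldl_cons]
    have hins : pyDictInsert d a.1 a.2 = d ++ [a] := by
      unfold pyDictInsert
      rw [if_neg ha]
    rw [hins, ih (d ++ [a])]
    · simp
    · intro p hp
      simp only [List.any_append, Bool.or_eq_true, not_or]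
      refine ⟨hfresh p (List.mem_cons_of_mem _ hp), ?_⟩
      simp only [List.any_cons, List.any_nil, Bool.or_false, Bool.not_eq_true] at *
      exact beq_eq_false_iff_ne.mpr (fun he => hnd.1 (he ▸ List.mem_map_of_mem hp))
    · exact hnd.2

-- ===== VERDICT (by name: the statement is the Claim_ definition above) =====
theorem with_telemetry_context_py_spec : Claim_equal_with_telemetry_context_py := by
  intro event tc _ hpre
  obtain ⟨-, hnt⟩ := hpre
  unfold Spec_with_telemetry_context_py with_telemetry_context_py with_telemetry_context_py_alt
  cases tc with
  | none => rfl
  | some t =>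
    by_cases he : t.isEmpty
    · simp [he]
    · simp only [if_neg he]
      have hnt' : (t.map Prod.fst).Nodup := by simpa using hnt
      rw [foldErase_eq_filter event t hnt']
      rw [foldInsert_fresh _ event ?_ ?_]
      · exact foldA_eq_append_filter t event hnt'
      · intro p hp
        have hf := List.of_mem_filter hp
        simp only [Bool.not_eq_true'] at hf
        simp [hf]
      · exact nodup_keys_filter t _ hnt'
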